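-- pv_equiv track=rewrite | github.com/kinjalpatel27/python_code | chap1_arrays_string/q1_2.py | check_perm
-- ===== SOURCE A (Python) =====
-- def check_perm(s1, s2):
--     s2_hash = {}
--     if len(s2) < len(s1):
--         return False
--     for ind in range(len(s2)):
--         if s2[ind] in s2_hash:
--             s2_hash[s2[ind]] += 1
--         else:
--             s2_hash[s2[ind]] = 1
--
--     perm = True
--     for ind in range(len(s1)):
--         if s1[ind] not in s2_hash:
--             perm = False
--             break
--
--     return perm
-- ===== SOURCE B (Python) =====
-- def check_perm(s1, s2):
--     if len(s2) < len(s1):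
--         return False
--     a = sorted(set(s1))
--     b = sorted(set(s2))
--     i = j = 0
--     while i < len(a):
--         if j == len(b):
--             return False
--         if a[i] == b[j]:
--             i += 1
--             j += 1
--         elif a[i] > b[j]:
--             j += 1
--         else:
--             return False
--     return True
-- ===== Notes on version B (the rewrite author's own statement) =====
-- stated objective: alternative
-- what changed: B sorts the distinct characters of both strings (the counts A collects are never used) and decides inclusion with a single two-pointer merge scan over the two sorted lists, replacing A's hash-table build and per-char lookups.
import Mathlib
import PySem

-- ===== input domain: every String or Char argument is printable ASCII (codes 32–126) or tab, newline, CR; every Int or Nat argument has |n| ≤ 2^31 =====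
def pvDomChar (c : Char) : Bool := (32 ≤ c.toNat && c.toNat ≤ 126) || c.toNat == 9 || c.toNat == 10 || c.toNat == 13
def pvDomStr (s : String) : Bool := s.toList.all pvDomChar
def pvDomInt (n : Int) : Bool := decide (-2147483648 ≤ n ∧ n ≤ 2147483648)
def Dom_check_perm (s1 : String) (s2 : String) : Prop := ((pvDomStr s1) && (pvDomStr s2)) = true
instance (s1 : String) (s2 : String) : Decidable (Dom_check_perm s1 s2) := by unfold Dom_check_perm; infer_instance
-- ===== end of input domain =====

-- B replaces A's frequency-dict build + per-char lookup with sorting the distinct chars of both strings and a single two-pointer merge subset scan (alternative algorithm).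
-- ===== PORT A =====
-- literal port of A: build a frequency dict over s2, then scan s1 with an early break
def checkPermLoop1 (d : PySem.Dict Char Int) (cs : List Char) : PySem.Dict Char Int :=
  cs.foldl (fun d c => if d.contains c then d.modify c 0 (· + 1) else d.insert c 1) d

def checkPermLoop2 (d : PySem.Dict Char Int) : List Char → Bool
  | [] => true
  | c :: cs => if d.contains c then checkPermLoop2 d cs else false

def check_perm (s1 : String) (s2 : String) : Bool :=
  if s2.toList.length < s1.toList.length then false
  else checkPermLoop2 (checkPermLoop1 PySem.Dict.empty s2.toList) s1.toList

-- ===== PORT B =====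
-- B's while loop over indices i,j, transcribed as recursion on the two sorted distinct-char lists
def mergeSub : List Char → List Char → Bool
  | [], _ => true
  | _ :: _, [] => false
  | x :: xs, y :: ys =>
    if x = y then mergeSub xs ys
    else if x > y then mergeSub (x :: xs) ys
    else false
termination_by a b => a.length + b.length

def check_perm_alt (s1 : String) (s2 : String) : Bool :=
  if s2.toList.length < s1.toList.length then false
  else mergeSub (PySem.List.sorted (PySem.Set.ofList s1.toList) (fun x => x) false)
                (PySem.List.sorted (PySem.Set.ofList s2.toList) (fun x => x) false)

-- ===== PRECONDITION & SPEC =====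
def Spec_check_perm (s1 : String) (s2 : String) (out : Bool) : Prop := out = check_perm_alt s1 s2
instance (s1 : String) (s2 : String) (out : Bool) : Decidable (Spec_check_perm s1 s2 out) := by unfold Spec_check_perm; infer_instance

-- ===== CLAIM (what is proved, stated in full; the proofs are below) =====
def Claim_equal_check_perm : Prop := ∀ (s1 : String) (s2 : String), Dom_check_perm s1 s2 → Spec_check_perm s1 s2 (check_perm s1 s2)

-- ===== LEMMAS AND PROOFS =====

theorem checkPermLoop1_contains (cs : List Char) (d : PySem.Dict Char Int) (c : Char) :
    (checkPermLoop1 d cs).contains c = (d.contains c || cs.contains c) := by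
  induction cs generalizing d with
  | nil => simp [checkPermLoop1]
  | cons a as ih =>
    simp only [checkPermLoop1, List.foldl_cons] at *
    rw [ih]
    have hstep : ((if d.contains a then d.modify a 0 (· + 1) else d.insert a 1).contains c)
        = (c == a || d.contains c) := by
      split_ifs with h
      · rw [PySem.Dict.contains_modify]
      · rw [PySem.Dict.contains_insert]
    rw [hstep]
    by_cases hc : c = a
    · subst hc; simp
    · have hba : (c == a) = false := beq_eq_false_iff_ne.mpr hc
      simp [hba, hc]

theorem checkPermLoop2_eq_all (d : PySem.Dict Char Int) (cs : List Char) :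
    checkPermLoop2 d cs = cs.all (fun c => d.contains c) := by
  induction cs with
  | nil => rfl
  | cons a as ih =>
    simp only [checkPermLoop2, List.all_cons]
    by_cases h : d.contains a <;> simp [h, ih]

-- pointwise congruence for List.all over the list's members
theorem all_congr_mem {α : Type} (l : List α) (p q : α → Bool) (h : ∀ x ∈ l, p x = q x) :
    l.all p = l.all q := by
  induction l with
  | nil => rfl
  | cons a as ih =>
    simp only [List.all_cons, h a (List.mem_cons_self), ih (fun x hx => h x (List.mem_cons_of_mem a hx))]

-- the merge subset scan on strictly increasing lists decides list-subset membership
theorem mergeSub_eq_all : ∀ (a b : List Char), a.Pairwise (· < ·) → b.Pairwise (· < ·) →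
    mergeSub a b = a.all (fun x => b.contains x) := by
  intro a b
  induction a, b using mergeSub.induct with
  | case1 b => intro _ _; simp [mergeSub]
  | case2 x xs => intro _ _; simp [mergeSub]
  | case3 xs y ys ih =>
    intro ha hb
    rw [List.pairwise_cons] at ha hb
    have hcg : xs.all (fun z => ys.contains z) = xs.all (fun z => (y :: ys).contains z) :=
      all_congr_mem _ _ _ (fun z hz => by
        have hne : z ≠ y := fun h => absurd (h ▸ ha.1 z hz) (lt_irrefl y)
        simp [List.contains_eq_mem, List.mem_cons, hne])
    simp only [mergeSub]
    rw [ih ha.2 hb.2, hcg]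
    simp [List.all_cons, List.contains_eq_mem]
  | case4 x xs y ys hne hgt ih =>
    intro ha hb
    rw [List.pairwise_cons] at hb
    simp only [mergeSub, if_neg hne, if_pos hgt]
    rw [ih ha hb.2]
    refine all_congr_mem _ _ _ (fun z hz => ?_)
    have hzy : z ≠ y := by
      have hax := List.pairwise_cons.mp ha
      rcases List.mem_cons.mp hz with h | h
      · exact h ▸ hne
      · have hyz : y < z := lt_trans hgt (hax.1 z h)
        exact fun he => absurd (he ▸ hyz) (lt_irrefl y)
    simp [List.contains_eq_mem, List.mem_cons, hzy]
  | case5 x xs y ys hne hgt =>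
    intro ha hb
    rw [List.pairwise_cons] at hb
    have hlt : x < y := lt_of_le_of_ne (le_of_not_gt hgt) hne
    have hx2 : x ∉ ys := fun h => absurd (lt_trans hlt (hb.1 x h)) (lt_irrefl x)
    simp [mergeSub, hne, hgt, List.all_cons, List.contains_eq_mem, hx2]

-- ===== VERDICT (by name: the statement is the Claim_ definition above) =====
theorem check_perm_spec : Claim_equal_check_perm := by
  intro s1 s2 _
  unfold Spec_check_perm check_perm check_perm_alt
  split_ifs with h
  · rfl
  · rw [checkPermLoop2_eq_all,
        mergeSub_eq_all _ _ (PySem.List.sorted_ofList_pairwise_lt _)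
          (PySem.List.sorted_ofList_pairwise_lt _)]
    rw [Bool.eq_iff_iff]
    simp only [List.all_eq_true, List.contains_eq_mem, PySem.List.mem_sorted,
      PySem.Set.mem_ofList, checkPermLoop1_contains, PySem.Dict.contains_empty,
      Bool.false_or, decide_eq_true_eq]
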